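-- pv_equiv track=rewrite | github.com/eunchae-jeon/algorithm | Programmers/line3.py | solution
-- ===== SOURCE A (Python) =====
-- def solution(road, n):
--     num_road = string_2_num(road)
--     if len(num_road) < n+1:
--         return sum(num_road)+len(num_road)-1
--     local = sum(num_road[:n+1])
--     answer = local
--     for i in range(len(num_road)-n-1):
--         local += (num_road[i+n+1] - num_road[i])
--         if num_road[i] < num_road[i+n+1]:
--             answer = local
--     return answer + n
--
-- def string_2_num(road):
--     num = []
--     temp = 0
--     for r in road:
--         if r == '0':
--             num.append(temp)
--             temp = 0
--         elif r == '1':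
--             temp += 1
--     num.append(temp)
--     return num
-- ===== SOURCE B (Python) =====
-- def solution(road, n):
--     num_road = string_2_num(road)
--     if len(num_road) < n+1:
--         return sum(num_road)+len(num_road)-1
--     pre = [0]
--     for v in num_road:
--         pre.append(pre[-1] + v)
--     answer = pre[n+1]
--     for i in range(len(num_road)-n-1):
--         if num_road[i] < num_road[i+n+1]:
--             answer = pre[i+n+2] - pre[i+1]
--     return answer + n
--
-- def string_2_num(road):
--     num = []
--     temp = 0
--     for r in road:
--         if r == '0':
--             num.append(temp)
--             temp = 0
--         elif r == '1':
--             temp += 1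
--     num.append(temp)
--     return num
-- ===== Notes on version B (the rewrite author's own statement) =====
-- stated objective: alternative
-- what changed: The incrementally maintained running window sum (local += a[i+n+1]-a[i]) is replaced by a prefix-sum array built once, with each window sum obtained as a pure lookup pre[i+n+2]-pre[i+1]; the loop carries only the answer.
import Mathlib
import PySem

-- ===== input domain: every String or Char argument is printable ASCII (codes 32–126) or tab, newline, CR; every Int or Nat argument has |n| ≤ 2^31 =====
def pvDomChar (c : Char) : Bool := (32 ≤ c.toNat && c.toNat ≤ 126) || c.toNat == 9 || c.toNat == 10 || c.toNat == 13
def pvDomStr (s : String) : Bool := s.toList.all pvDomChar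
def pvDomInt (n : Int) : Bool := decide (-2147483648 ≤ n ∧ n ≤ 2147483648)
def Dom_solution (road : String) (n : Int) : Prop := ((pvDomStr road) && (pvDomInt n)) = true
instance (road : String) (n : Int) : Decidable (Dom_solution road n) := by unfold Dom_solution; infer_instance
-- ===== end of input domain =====

-- B replaces A's incrementally-maintained running window sum by a prefix-sum array with
-- pure lookups (objective: alternative decomposition, same asymptotic cost).

-- ===== PORT A =====
-- helper string_2_num, shared verbatim by both Pythons (Source B keeps it unchanged)
def string_2_num (road : String) : List Int :=
  let st := road.toList.foldl
    (fun (st : List Int × Int) r =>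
      if r = '0' then (st.1 ++ [st.2], 0)
      else if r = '1' then (st.1, st.2 + 1)
      else st) ([], 0)
  st.1 ++ [st.2]

-- pyGetD with default 0 ports num_road[...]: under Pre_solution every index is in range
def solution (road : String) (n : Int) : Int :=
  let num_road := string_2_num road
  if (num_road.length : Int) < n + 1 then
    num_road.sum + (num_road.length : Int) - 1
  else
    let locInit := (PySem.List.slice num_road none (some (n + 1))).sum
    let st := (PySem.List.pyRange 0 ((num_road.length : Int) - n - 1) 1).foldl
      (fun (st : Int × Int) i =>
        let loc := st.1 + (PySem.List.pyGetD num_road (i + n + 1) 0 - PySem.List.pyGetD num_road i 0)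
        (loc, if PySem.List.pyGetD num_road i 0 < PySem.List.pyGetD num_road (i + n + 1) 0 then loc
              else st.2))
      (locInit, locInit)
    st.2 + n

-- ===== PORT B =====
def solution_alt (road : String) (n : Int) : Int :=
  let num_road := string_2_num road
  if (num_road.length : Int) < n + 1 then
    num_road.sum + (num_road.length : Int) - 1
  else
    let pre := num_road.foldl
      (fun (p : List Int) v => p ++ [PySem.List.pyGetD p (-1) 0 + v]) [0]
    let answer := (PySem.List.pyRange 0 ((num_road.length : Int) - n - 1) 1).foldl
      (fun ans i =>
        if PySem.List.pyGetD num_road i 0 < PySem.List.pyGetD num_road (i + n + 1) 0 then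
          PySem.List.pyGetD pre (i + n + 2) 0 - PySem.List.pyGetD pre (i + 1) 0
        else ans)
      (PySem.List.pyGetD pre (n + 1) 0)
    answer + n

-- ===== PRECONDITION & SPEC =====
-- Pre_ excludes exactly n ≤ -2, where the Python A raises IndexError (num_road[i] with i ≥ len).
def Pre_solution (road : String) (n : Int) : Prop := -1 ≤ n
instance (road : String) (n : Int) : Decidable (Pre_solution road n) := by
  unfold Pre_solution; infer_instance
def pvWitness_solution : String × Int := ("11011", 1)

def Spec_solution (road : String) (n : Int) (out : Int) : Prop := out = solution_alt road n
instance (road : String) (n : Int) (out : Int) : Decidable (Spec_solution road n out) := by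
  unfold Spec_solution; infer_instance

-- ===== CLAIM (what is proved, stated in full; the proofs are below) =====
def Claim_equal_solution : Prop := ∀ (road : String) (n : Int),
  Dom_solution road n → Pre_solution road n → Spec_solution road n (solution road n)

-- ===== LEMMAS AND PROOFS =====

def preTail (c : Int) : List Int → List Int
  | [] => []
  | v :: t => (c + v) :: preTail (c + v) t

theorem preTail_build (xs : List Int) : ∀ (p : List Int) (c : Int), p.getLast? = some c →
    xs.foldl (fun (p : List Int) v => p ++ [PySem.List.pyGetD p (-1) 0 + v]) p
      = p ++ preTail c xs := by
  induction xs with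
  | nil => intro p c h; simp [preTail]
  | cons v t ih =>
    intro p c h
    have hg : PySem.List.pyGetD p (-1) 0 = c := by
      simp [PySem.List.pyGetD, PySem.List.pyGet?_neg_one, h]
    simp only [List.foldl_cons, hg]
    rw [ih (p ++ [c + v]) (c + v) (List.getLast?_concat)]
    simp [preTail]

theorem preTail_getD (xs : List Int) : ∀ (c : Int) (j : Nat), j < xs.length →
    (preTail c xs).getD j 0 = c + (xs.take (j + 1)).sum := by
  induction xs with
  | nil => intro c j h; simp at h
  | cons v t ih =>
    intro c j h
    cases j with
    | zero => simp [preTail]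
    | succ j =>
      simp only [preTail, List.getD_cons_succ, List.take_succ_cons, List.sum_cons]
      rw [ih (c + v) j (by simpa using h)]
      ring

theorem pre_getD (xs : List Int) (k : Nat) (hk : k ≤ xs.length) :
    (xs.foldl (fun (p : List Int) v => p ++ [PySem.List.pyGetD p (-1) 0 + v]) [0]).getD k 0
      = (xs.take k).sum := by
  rw [preTail_build xs [0] 0 rfl]
  cases k with
  | zero => simp
  | succ j =>
    rw [show (([0] : List Int) ++ preTail 0 xs) = (0 : Int) :: preTail 0 xs by simp,
        List.getD_cons_succ, preTail_getD xs 0 j (by omega)]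
    ring

theorem sum_take_succ (xs : List Int) (t : Nat) (ht : t < xs.length) :
    (xs.take (t + 1)).sum = (xs.take t).sum + xs.getD t 0 := by
  rw [List.take_add, List.sum_append, List.getD_eq_getElem xs 0 ht,
      List.drop_eq_getElem_cons ht, List.take_succ_cons, List.take_zero]
  simp

theorem sum_window (xs : List Int) (j m : Nat) :
    (xs.take (j + m)).sum - (xs.take j).sum = ((xs.drop j).take m).sum := by
  rw [List.take_add]
  simp

theorem loop_eq (xs pre : List Int) (n : Int) (m : Nat) (hm : (m : Int) = n + 1)
    (hpre : ∀ k : Nat, k ≤ xs.length → PySem.List.pyGetD pre (k : Int) 0 = (xs.take k).sum) :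
    ∀ (k j : Nat) (loc ans : Int), j + m + k = xs.length →
      loc = ((xs.drop j).take m).sum →
      ((PySem.List.pyRange (j : Int) ((xs.length : Int) - n - 1) 1).foldl
        (fun (st : Int × Int) i =>
          let l := st.1 + (PySem.List.pyGetD xs (i + n + 1) 0 - PySem.List.pyGetD xs i 0)
          (l, if PySem.List.pyGetD xs i 0 < PySem.List.pyGetD xs (i + n + 1) 0 then l else st.2))
        (loc, ans)).2
      = (PySem.List.pyRange (j : Int) ((xs.length : Int) - n - 1) 1).foldl
        (fun ans i =>
          if PySem.List.pyGetD xs i 0 < PySem.List.pyGetD xs (i + n + 1) 0 then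
            PySem.List.pyGetD pre (i + n + 2) 0 - PySem.List.pyGetD pre (i + 1) 0
          else ans) ans := by
  intro k
  induction k with
  | zero =>
    intro j loc ans hlen hloc
    rw [PySem.List.pyRange_one_eq_nil (by omega)]
    rfl
  | succ k ih =>
    intro j loc ans hlen hloc
    have hj : j < xs.length := by omega
    have hjm : j + m < xs.length := by omega
    rw [PySem.List.pyRange_one_cons (by omega)]
    simp only [List.foldl_cons]
    have e1 : ((j : Int) + n + 1) = ((j + m : Nat) : Int) := by push_cast; omega
    have e2 : ((j : Int) + n + 2) = ((j + m + 1 : Nat) : Int) := by push_cast; omega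
    have e3 : ((j : Int) + 1) = ((j + 1 : Nat) : Int) := by push_cast; ring
    rw [e1, e2, e3]
    simp only [PySem.List.pyGetD_natCast,
      hpre (j + m + 1) (by omega), hpre (j + 1) (by omega)]
    have hloc' : loc + (xs.getD (j + m) 0 - xs.getD j 0) = ((xs.drop (j+1)).take m).sum := by
      rw [← sum_window xs (j+1) m, show j + 1 + m = (j + m) + 1 by omega,
          sum_take_succ xs (j+m) hjm, sum_take_succ xs j hj]
      have := sum_window xs j m
      omega
    have hval : (xs.take (j + m + 1)).sum - (xs.take (j + 1)).sum
        = ((xs.drop (j+1)).take m).sum := by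
      rw [show j + m + 1 = (j + 1) + m by omega]
      exact sum_window xs (j+1) m
    by_cases hc : xs.getD j 0 < xs.getD (j + m) 0
    · simp only [if_pos hc]
      rw [hval, hloc']
      exact ih (j+1) _ _ (by omega) rfl
    · simp only [if_neg hc]
      exact ih (j+1) _ ans (by omega) hloc'

-- ===== VERDICT (by name: the statement is the Claim_ definition above) =====
theorem solution_spec : Claim_equal_solution := by
  intro road n _ hn
  unfold Spec_solution
  simp only [solution, solution_alt]
  set xs := string_2_num road with hxs
  set pre := xs.foldl (fun (p : List Int) v => p ++ [PySem.List.pyGetD p (-1) 0 + v]) [0] with hpredef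
  split_ifs with hL
  · rfl
  · have hn1 : (0 : Int) ≤ n + 1 := by
      have : (-1 : Int) ≤ n := hn
      omega
    set m : Nat := (n + 1).toNat with hmdef
    have hm : (m : Int) = n + 1 := Int.toNat_of_nonneg hn1
    have hmL : m ≤ xs.length := by omega
    have hpre : ∀ k : Nat, k ≤ xs.length → PySem.List.pyGetD pre (k : Int) 0 = (xs.take k).sum := by
      intro k hk
      rw [hpredef, PySem.List.pyGetD_natCast]
      exact pre_getD xs k hk
    rw [PySem.List.slice_to (hb := hn1), ← hm]
    rw [show PySem.List.pyGetD pre ((m : Nat) : Int) 0 = (xs.take m).sum from hpre m hmL]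
    have key := loop_eq xs pre n m hm hpre (xs.length - m) 0
      ((xs.take ((m : Int)).toNat).sum) ((xs.take m).sum) (by omega)
      (by simp [Int.toNat_natCast])
    simpa using key
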